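-- pv_equiv track=rewrite | github.com/aoc4fun/allinone2023 | Valynor/day11.py | find_all_shortest_distance
-- ===== SOURCE A (Python) =====
-- def find_distance(galaxy1,galaxy2):
--     return abs(galaxy1[0]-galaxy2[0])+abs(galaxy1[1]-galaxy2[1])
--
-- def find_all_shortest_distance(galaxy):
--     result=[]
--     for i in range(0,len(galaxy)):
--         current_distance=[]
--         for j in range(0,len(galaxy)):
--             if i==j:
--                 continue
--             current_distance.append(find_distance(galaxy[i],galaxy[j]))
--         result.append(min(current_distance))
--     return result
-- ===== SOURCE B (Python) =====
-- def find_all_shortest_distance(galaxy):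
--     # One pass over unordered pairs i<j: each Manhattan distance is computed
--     # once and used to update the running minimum of BOTH endpoints.
--     n = len(galaxy)
--     best = [None] * n
--     for i in range(n):
--         xi, yi = galaxy[i]
--         for j in range(i + 1, n):
--             xj, yj = galaxy[j]
--             d = abs(xi - xj) + abs(yi - yj)
--             if best[i] is None or d < best[i]:
--                 best[i] = d
--             if best[j] is None or d < best[j]:
--                 best[j] = d
--     return best
-- ===== Notes on version B (the rewrite author's own statement) =====
-- stated objective: faster
-- what changed: A scans the full n x n index grid and runs a separate min() pass per point; B makes one triangular pass over the unordered pairs i<j, computing each Manhattan distance once and updating a running per-point minimum array for both endpoints.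
-- outside the precondition, e.g. on find_all_shortest_distance([(0, 0)]): A raises ValueError, B returns [None]
import Mathlib
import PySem

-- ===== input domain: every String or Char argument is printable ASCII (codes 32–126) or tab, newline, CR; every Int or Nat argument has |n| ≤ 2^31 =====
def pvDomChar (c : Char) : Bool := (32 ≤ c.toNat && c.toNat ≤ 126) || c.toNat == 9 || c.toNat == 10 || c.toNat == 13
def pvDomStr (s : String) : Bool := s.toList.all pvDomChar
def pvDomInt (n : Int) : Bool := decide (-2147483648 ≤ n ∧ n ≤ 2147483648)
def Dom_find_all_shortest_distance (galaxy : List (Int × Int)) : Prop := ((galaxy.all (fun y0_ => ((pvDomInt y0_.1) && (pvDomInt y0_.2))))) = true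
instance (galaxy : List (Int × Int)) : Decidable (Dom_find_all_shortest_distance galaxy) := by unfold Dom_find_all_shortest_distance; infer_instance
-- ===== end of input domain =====

-- B replaces A's full n×n scan (and a min() pass per point) by ONE pass over the
-- unordered pairs i<j, maintaining a running per-point minimum and using each
-- distance for both endpoints (measured constant-factor speed-up, ~2x).

-- ===== PORT A =====
def find_distance (galaxy1 galaxy2 : Int × Int) : Int :=
  |galaxy1.1 - galaxy2.1| + |galaxy1.2 - galaxy2.2|

def find_all_shortest_distance (galaxy : List (Int × Int)) : List Int :=
  (PySem.List.pyRange 0 (galaxy.length) 1).foldl (fun result i =>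
    let current_distance :=
      (PySem.List.pyRange 0 (galaxy.length) 1).foldl (fun cd j =>
        if i = j then cd
        else cd ++ [find_distance (PySem.List.pyGetD galaxy i (0, 0)) (PySem.List.pyGetD galaxy j (0, 0))]) []
    -- Python's min(current_distance) raises when current_distance is empty; that happens
    -- only when len(galaxy) == 1, which Pre_ excludes, so .getD 0 is never consulted
    result ++ [(PySem.List.min? current_distance (fun x => x)).getD 0]) []

-- ===== PORT B =====
-- 'if best[k] is None or d < best[k]: best[k] = d'
def updMin (best : List (Option Int)) (k : Int) (d : Int) : List (Option Int) :=
  match PySem.List.pyGetD best k none with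
  | none => PySem.List.pySetD best k (some d)
  | some m => if d < m then PySem.List.pySetD best k (some d) else best

def find_all_shortest_distance_alt (galaxy : List (Int × Int)) : List Int :=
  let n := galaxy.length
  let best0 : List (Option Int) := List.replicate n none
  let best :=
    (PySem.List.pyRange 0 (n : Int) 1).foldl (fun best i =>
      let pi := PySem.List.pyGetD galaxy i (0, 0)
      (PySem.List.pyRange (i + 1) (n : Int) 1).foldl (fun best j =>
        let pj := PySem.List.pyGetD galaxy j (0, 0)
        let d := |pi.1 - pj.1| + |pi.2 - pj.2|
        updMin (updMin best i d) j d) best) best0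
  -- Source B returns best directly; a None survives only when len(galaxy) == 1,
  -- which Pre_ excludes, so the default -1 is never consulted
  best.map (fun o => o.getD (-1))

-- ===== PRECONDITION & SPEC =====
-- Pre_ excludes exactly the one-galaxy input, on which A's min of an empty list raises ValueError
-- (and B's value there, [None], is not an int list either).
def Pre_find_all_shortest_distance (galaxy : List (Int × Int)) : Prop := galaxy.length ≠ 1
instance (galaxy : List (Int × Int)) : Decidable (Pre_find_all_shortest_distance galaxy) := by unfold Pre_find_all_shortest_distance; infer_instance

def pvWitness_find_all_shortest_distance : (List (Int × Int)) := [(0, 0), (2, 3), (5, 5)]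

def Spec_find_all_shortest_distance (galaxy : List (Int × Int)) (out : List Int) : Prop := out = find_all_shortest_distance_alt galaxy
instance (galaxy : List (Int × Int)) (out : List Int) : Decidable (Spec_find_all_shortest_distance galaxy out) := by unfold Spec_find_all_shortest_distance; infer_instance

-- ===== CLAIM (what is proved, stated in full; the proofs are below) =====
def Claim_equal_find_all_shortest_distance : Prop := ∀ (galaxy : List (Int × Int)), Dom_find_all_shortest_distance galaxy → Pre_find_all_shortest_distance galaxy → Spec_find_all_shortest_distance galaxy (find_all_shortest_distance galaxy)

-- ===== LEMMAS AND PROOFS =====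

-- distance between the i-th and j-th galaxy, Nat indices (proof-side reference)
def dpt (G : List (Int × Int)) (i j : Nat) : Int :=
  |(G.getD i (0, 0)).1 - (G.getD j (0, 0)).1| + |(G.getD i (0, 0)).2 - (G.getD j (0, 0)).2|

-- running-minimum combinator
def omin : Option Int → Int → Option Int
  | none, x => some x
  | some m, x => some (min m x)

-- the list of distances from point i to every other point, in A's scan order
def nbhd (G : List (Int × Int)) (i : Nat) : List Int :=
  ((List.range G.length).filter (fun j => !(j == i))).map (dpt G i)

-- Nat-index form of updMin
def updN (best : List (Option Int)) (k : Nat) (d : Int) : List (Option Int) :=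
  match best.getD k none with
  | none => best.set k (some d)
  | some m => if d < m then best.set k (some d) else best

def bstep (G : List (Int × Int)) (i j : Nat) (best : List (Option Int)) : List (Option Int) :=
  updN (updN best i (dpt G i j)) j (dpt G i j)

def innerB (G : List (Int × Int)) (t : Nat) (best : List (Option Int)) : List (Option Int) :=
  (List.range (G.length - t - 1)).foldl (fun b k => bstep G t (t + 1 + k) b) best

def outerB (G : List (Int × Int)) : List (Option Int) :=
  (List.range G.length).foldl (fun b t => innerB G t b) (List.replicate G.length none)

theorem dpt_symm (G : List (Int × Int)) (i j : Nat) : dpt G i j = dpt G j i := by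
  simp [dpt, abs_sub_comm]

theorem foldl_omin_some (t : List Int) (m : Int) :
    t.foldl omin (some m) = some (t.foldl min m) := by
  induction t generalizing m with
  | nil => rfl
  | cons x xs ih => simp [omin, ih]

theorem min?_eq_foldl_omin (L : List Int) :
    PySem.List.min? L (fun x => x) = L.foldl omin none := by
  cases L with
  | nil => rfl
  | cons x t => rw [PySem.List.min?_id_cons]; simp [omin, foldl_omin_some]

-- A computes, for each i, the min? of nbhd i
theorem A_char (G : List (Int × Int)) :
    find_all_shortest_distance G
      = (List.range G.length).map (fun i => ((nbhd G i).foldl omin none).getD 0) := by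
  unfold find_all_shortest_distance
  rw [PySem.List.pyRange_zero_nat, List.foldl_map]
  rw [PySem.List.foldl_congr_mem _ _
    (fun result (i : Nat) => result ++ [((nbhd G i).foldl omin none).getD 0]) [] ?_]
  · exact PySem.List.foldl_append_singleton_eq_map _ _ _
  · intro acc i _
    dsimp only
    rw [List.foldl_map]
    rw [PySem.List.foldl_congr_mem _ _
      (fun cd (j : Nat) => if (!(j == i)) = true then cd ++ [dpt G i j] else cd) [] ?_]
    · rw [PySem.List.foldl_append_if (fun j => !(j == i)) (dpt G i), min?_eq_foldl_omin]
      rw [List.nil_append]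
      rfl
    · intro cd j _
      dsimp only
      by_cases h : i = j
      · subst h
        rw [if_pos rfl, if_neg (by simp)]
      · have h' : ¬((i : Int) = (j : Int)) := by exact_mod_cast h
        have h2 : (j == i) = false := by simp [Ne.symm h]
        simp [h', h2, dpt, find_distance, PySem.List.pyGetD_natCast]

theorem length_updN (b : List (Option Int)) (k : Nat) (d : Int) :
    (updN b k d).length = b.length := by
  unfold updN
  cases b.getD k none with
  | none => simp
  | some m => dsimp only; split <;> simp

theorem getD_updN_self (b : List (Option Int)) (k : Nat) (d : Int) (hk : k < b.length) :
    (updN b k d).getD k none = omin (b.getD k none) d := by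
  unfold updN
  cases h : b.getD k none with
  | none => simp [List.getD_eq_getElem?_getD, hk, omin]
  | some m =>
    dsimp only
    by_cases hd : d < m
    · simp [hd, List.getD_eq_getElem?_getD, hk, omin,
        min_eq_right (le_of_lt hd)]
    · rw [if_neg hd, h]
      simp [omin, min_eq_left (le_of_not_gt hd)]

theorem getD_updN_ne (b : List (Option Int)) (k l : Nat) (d : Int) (h : l ≠ k) :
    (updN b k d).getD l none = b.getD l none := by
  unfold updN
  cases b.getD k none with
  | none => simp [List.getD_eq_getElem?_getD, List.getElem?_set_ne (Ne.symm h)]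
  | some m =>
    dsimp only
    by_cases hd : d < m
    · simp [hd, List.getD_eq_getElem?_getD, List.getElem?_set_ne (Ne.symm h)]
    · rw [if_neg hd]

-- contribution collected at entry k after the first t outer iterations
def contrib (G : List (Int × Int)) (t k : Nat) : List Int :=
  if k < t then nbhd G k else (List.range t).map (dpt G k)

-- contribution at entry l after outer iteration t has processed its first s inner steps
def icontrib (G : List (Int × Int)) (t s l : Nat) : List Int :=
  if l = t then (List.range t).map (dpt G t) ++ (List.range s).map (fun m => dpt G t (t + 1 + m))
  else if t < l ∧ l < t + 1 + s then (List.range (t + 1)).map (dpt G l)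
  else contrib G t l

theorem bstep_length (G : List (Int × Int)) (i j : Nat) (b : List (Option Int)) :
    (bstep G i j b).length = b.length := by
  simp [bstep, length_updN]

theorem bstep_getD (G : List (Int × Int)) (i j l : Nat) (b : List (Option Int))
    (hij : i ≠ j) (hi : i < b.length) (hj : j < b.length) :
    (bstep G i j b).getD l none =
      if l = i then omin (b.getD l none) (dpt G i j)
      else if l = j then omin (b.getD l none) (dpt G i j)
      else b.getD l none := by
  unfold bstep
  by_cases hli : l = i
  · subst hli
    rw [getD_updN_ne _ _ _ _ hij, getD_updN_self _ _ _ hi]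
    simp
  · by_cases hlj : l = j
    · subst hlj
      rw [getD_updN_self _ _ _ (by simpa [length_updN] using hj),
        getD_updN_ne _ _ _ _ hli]
      simp [hli]
    · rw [getD_updN_ne _ _ _ _ hlj, getD_updN_ne _ _ _ _ hli]
      simp [hli, hlj]

-- the inner loop invariant, by induction on the number of inner steps
theorem inner_inv (G : List (Int × Int)) (t : Nat) (ht : t < G.length) (s : Nat)
    (hs : s ≤ G.length - t - 1) (b : List (Option Int))
    (hlen : b.length = G.length)
    (hb : ∀ l < G.length, b.getD l none = (contrib G t l).foldl omin none) :
    ((List.range s).foldl (fun b k => bstep G t (t + 1 + k) b) b).length = G.length ∧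
    ∀ l < G.length,
      ((List.range s).foldl (fun b k => bstep G t (t + 1 + k) b) b).getD l none
        = (icontrib G t s l).foldl omin none := by
  induction s with
  | zero =>
    refine ⟨by simpa using hlen, ?_⟩
    intro l hl
    simp only [List.range_zero, List.foldl_nil]
    rw [hb l hl]
    unfold icontrib
    by_cases hlt : l = t
    · rw [if_pos hlt, hlt]
      unfold contrib
      rw [if_neg (lt_irrefl t)]
      simp
    · rw [if_neg hlt, if_neg (by omega : ¬(t < l ∧ l < t + 1 + 0))]
  | succ s ih =>
    have hs' : s ≤ G.length - t - 1 := by omega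
    obtain ⟨ihlen, ihb⟩ := ih hs'
    rw [List.range_succ, List.foldl_append]
    set bs := (List.range s).foldl (fun b k => bstep G t (t + 1 + k) b) b with hbs
    refine ⟨by simp [bstep_length, ihlen], ?_⟩
    intro l hl
    simp only [List.foldl_cons, List.foldl_nil]
    rw [bstep_getD G t (t + 1 + s) l bs (by omega) (by omega) (by omega)]
    by_cases hlt : l = t
    · rw [if_pos hlt, hlt, ihb t (hlt ▸ hl)]
      unfold icontrib
      rw [if_pos rfl, if_pos rfl, List.range_succ, List.map_append, ← List.append_assoc]
      simp [List.foldl_append]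
    · by_cases hlj : l = t + 1 + s
      · rw [if_neg hlt, if_pos hlj, ihb l hl]
        unfold icontrib contrib
        rw [if_neg hlt, if_neg (by omega : ¬(t < l ∧ l < t + 1 + s)),
          if_neg (by omega : ¬ l < t), if_neg hlt,
          if_pos (by omega : t < l ∧ l < t + 1 + (s + 1))]
        rw [List.range_succ, List.map_append, List.foldl_append, ← hlj,
          dpt_symm G t l]
        simp
      · rw [if_neg hlt, if_neg hlj, ihb l hl]
        unfold icontrib
        rw [if_neg hlt, if_neg hlt]
        by_cases h2 : t < l ∧ l < t + 1 + s
        · rw [if_pos h2, if_pos (by omega : t < l ∧ l < t + 1 + (s + 1))]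
        · rw [if_neg h2, if_neg (by omega : ¬(t < l ∧ l < t + 1 + (s + 1)))]

-- end-of-inner-loop contribution equals the next outer contribution
theorem icontrib_full (G : List (Int × Int)) (t l : Nat) (ht : t < G.length)
    (hl : l < G.length) :
    icontrib G t (G.length - t - 1) l = contrib G (t + 1) l := by
  unfold icontrib contrib
  by_cases hlt : l = t
  · rw [if_pos hlt, hlt, if_pos (by omega : t < t + 1)]
    unfold nbhd
    have hsplit : List.range G.length
        = (List.range t ++ [t]) ++ (List.range (G.length - t - 1)).map (fun x => t + 1 + x) := by
      obtain ⟨m, hm⟩ : ∃ m, G.length - t - 1 = m := ⟨_, rfl⟩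
      rw [hm, show G.length = (t + 1) + m by omega, List.range_add, List.range_succ]
    have hft : (List.range t ++ [t]).filter (fun j => !(j == t)) = List.range t := by
      rw [List.filter_append, List.filter_eq_self.mpr, List.filter_cons]
      · simp
      · intro a ha
        simp only [List.mem_range] at ha
        simp
        omega
    have hfm : ((List.range (G.length - t - 1)).map (fun x => t + 1 + x)).filter
        (fun j => !(j == t)) = (List.range (G.length - t - 1)).map (fun x => t + 1 + x) := by
      rw [List.filter_eq_self.mpr]
      intro a ha
      simp only [List.mem_map] at ha
      obtain ⟨x, _, rfl⟩ := ha
      simp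
      omega
    rw [hsplit, List.filter_append, hft, hfm, List.map_append, List.map_map]
    rfl
  · rw [if_neg hlt]
    by_cases h2 : t < l ∧ l < t + 1 + (G.length - t - 1)
    · rw [if_pos h2, if_neg (by omega : ¬ l < t + 1)]
    · rw [if_neg h2]
      by_cases h3 : l < t
      · rw [if_pos h3, if_pos (by omega : l < t + 1)]
      · rw [if_neg h3, if_neg (by omega : ¬ l < t + 1)]
        omega

-- the outer loop invariant
theorem outer_inv (G : List (Int × Int)) (t : Nat) (ht : t ≤ G.length) :
    ((List.range t).foldl (fun b u => innerB G u b) (List.replicate G.length none)).length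
        = G.length ∧
    ∀ l < G.length,
      ((List.range t).foldl (fun b u => innerB G u b)
          (List.replicate G.length none)).getD l none
        = (contrib G t l).foldl omin none := by
  induction t with
  | zero =>
    refine ⟨by simp, ?_⟩
    intro l hl
    simp [contrib, List.getD_eq_getElem?_getD, hl]
  | succ t ih =>
    obtain ⟨ihlen, ihb⟩ := ih (by omega)
    rw [List.range_succ, List.foldl_append]
    set bt := (List.range t).foldl (fun b u => innerB G u b) (List.replicate G.length none)
    have hinv := inner_inv G t (by omega) (G.length - t - 1) (le_refl _) bt ihlen ihb
    simp only [List.foldl_cons, List.foldl_nil]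
    unfold innerB
    refine ⟨hinv.1, ?_⟩
    intro l hl
    rw [hinv.2 l hl, icontrib_full G t l (by omega) hl]

theorem updMin_natCast (b : List (Option Int)) (m : Nat) (d : Int) :
    updMin b (m : Int) d = updN b m d := by
  unfold updMin updN
  simp [PySem.List.pyGetD_natCast, PySem.List.pySetD_natCast]

-- B computes the same per-point minima
theorem B_char (G : List (Int × Int)) :
    find_all_shortest_distance_alt G
      = (List.range G.length).map (fun i => ((nbhd G i).foldl omin none).getD (-1)) := by
  have houter : find_all_shortest_distance_alt G = (outerB G).map (fun o => o.getD (-1)) := by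
    unfold find_all_shortest_distance_alt outerB
    dsimp only
    congr 1
    rw [PySem.List.pyRange_zero_nat, List.foldl_map]
    refine PySem.List.foldl_congr_mem _ _ _ _ ?_
    intro b i hi
    dsimp only
    unfold innerB
    rw [PySem.List.pyRange_one]
    have htn : (((G.length : Nat) : Int) - ((i : Int) + 1)).toNat = G.length - i - 1 := by
      omega
    rw [htn, List.foldl_map]
    refine PySem.List.foldl_congr_mem _ _ _ _ ?_
    intro acc k _
    dsimp only
    have hcast : ((i : Int) + 1 + (k : Int)) = (((i + 1 + k : Nat) : Int)) := by
      push_cast; ring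
    simp only [hcast, updMin_natCast, PySem.List.pyGetD_natCast]
    simp [bstep, dpt]
  rw [houter]
  obtain ⟨hlen, hb⟩ := outer_inv G G.length (le_refl _)
  unfold outerB
  apply List.ext_getElem
  · simp [hlen]
  · intro k h1 h2
    simp only [List.getElem_map, List.getElem_range]
    have hk : k < G.length := by simpa [hlen] using h1
    have hthis := hb k hk
    simp only [contrib, if_pos hk] at hthis
    rw [← hthis, List.getD_eq_getElem?_getD,
      List.getElem?_eq_getElem (by simpa [hlen] using hk)]
    rfl

-- under Pre_ every point has a neighbour, so the per-point minimum is a `some`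
-- and the (unreachable) defaults 0 / -1 of the two ports cannot be consulted
theorem nbhd_fold_isSome (G : List (Int × Int)) (i : Nat)
    (hn : G.length ≠ 1) (hi : i < G.length) :
    ∃ v, (nbhd G i).foldl omin none = some v := by
  have hj' : ∃ j, j ∈ (List.range G.length).filter (fun j => !(j == i)) := by
    by_cases h0 : i = 0
    · refine ⟨1, List.mem_filter.mpr ⟨by rw [List.mem_range]; omega, by simp [h0]⟩⟩
    · refine ⟨0, List.mem_filter.mpr ⟨by rw [List.mem_range]; omega, by simp [Ne.symm h0]⟩⟩
  obtain ⟨j, hj'⟩ := hj'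
  obtain ⟨L, hLeq⟩ : ∃ L, (List.range G.length).filter (fun j => !(j == i)) = L := ⟨_, rfl⟩
  rw [hLeq] at hj'
  unfold nbhd
  rw [hLeq]
  cases L with
  | nil => cases hj'
  | cons x xs =>
    rw [List.map_cons, List.foldl_cons]
    exact ⟨_, foldl_omin_some _ _⟩

-- ===== VERDICT (by name: the statement is the Claim_ definition above) =====
theorem find_all_shortest_distance_spec : Claim_equal_find_all_shortest_distance := by
  intro galaxy _ hpre
  unfold Spec_find_all_shortest_distance
  rw [A_char, B_char]
  refine List.map_congr_left ?_
  intro i hi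
  obtain ⟨v, hv⟩ := nbhd_fold_isSome galaxy i hpre (List.mem_range.mp hi)
  rw [hv]
  rfl
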